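-- pv_equiv track=rewrite | github.com/enspyrco/tech_world | tool/refine_modern_office_barriers.py | format_dart_set
-- ===== SOURCE A (Python) =====
-- COLUMNS = 16
--
-- def find_contiguous_ranges(indices: list[int]) -> list[tuple[int, int]]:
--     """Group sorted indices into contiguous (start, end) ranges."""
--     if not indices:
--         return []
--     ranges: list[tuple[int, int]] = []
--     start = indices[0]
--     end = indices[0]
--     for i in indices[1:]:
--         if i == end + 1:
--             end = i
--         else:
--             ranges.append((start, end))
--             start = i
--             end = i
--     ranges.append((start, end))
--     return ranges
--
-- def format_dart_set(barriers: set[int]) -> str: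
--     """Format barriers as Dart Set<int> for predefined_tilesets.dart."""
--     sorted_indices = sorted(barriers)
--     lines: list[str] = []
--     lines.append("final Set<int> _modernOfficeBarriers = {")
--
--     ranges = find_contiguous_ranges(sorted_indices)
--     for start, end in ranges:
--         count = end - start + 1
--         start_row = start // COLUMNS
--         end_row = end // COLUMNS
--         if count >= 8:
--             lines.append(
--                 f"  for (int i = {start}; i <= {end}; i++) i, "
--                 f"// rows {start_row}–{end_row} ({count} tiles)"
--             )
--         else:
--             vals = ", ".join(str(i) for i in range(start, end + 1))
--             lines.append(f"  {vals}, // row {start_row}")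
--     lines.append("};")
--     return "\n".join(lines)
-- ===== SOURCE B (Python) =====
-- COLUMNS = 16
--
-- def format_dart_set(barriers):
--     """Format barriers as Dart Set<int> for predefined_tilesets.dart."""
--     s = set(barriers)
--     xs = sorted(s)
--     # a value starts a contiguous run iff its predecessor is absent from the
--     # set, and ends one iff its successor is absent; the k-th start pairs with
--     # the k-th end, so zipping the two filtered lists yields all runs.
--     starts = [x for x in xs if x - 1 not in s]
--     ends = [x for x in xs if x + 1 not in s]
--     lines = ["final Set<int> _modernOfficeBarriers = {"]
--     for start, end in zip(starts, ends):
--         count = end - start + 1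
--         start_row = start // COLUMNS
--         if count >= 8:
--             end_row = end // COLUMNS
--             lines.append(
--                 f"  for (int i = {start}; i <= {end}; i++) i, "
--                 f"// rows {start_row}\u2013{end_row} ({count} tiles)"
--             )
--         else:
--             vals = ", ".join(str(i) for i in range(start, end + 1))
--             lines.append(f"  {vals}, // row {start_row}")
--     lines.append("};")
--     return "\n".join(lines)
-- ===== Notes on version B (the rewrite author's own statement) =====
-- stated objective: alternative
-- what changed: B replaces A's sequential range-accumulator scan (find_contiguous_ranges) with set-membership boundary detection: a value is a run start iff x-1 is not in the set and a run end iff x+1 is not in the set, and zipping the filtered starts with the filtered ends yields the ranges.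
import Mathlib
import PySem

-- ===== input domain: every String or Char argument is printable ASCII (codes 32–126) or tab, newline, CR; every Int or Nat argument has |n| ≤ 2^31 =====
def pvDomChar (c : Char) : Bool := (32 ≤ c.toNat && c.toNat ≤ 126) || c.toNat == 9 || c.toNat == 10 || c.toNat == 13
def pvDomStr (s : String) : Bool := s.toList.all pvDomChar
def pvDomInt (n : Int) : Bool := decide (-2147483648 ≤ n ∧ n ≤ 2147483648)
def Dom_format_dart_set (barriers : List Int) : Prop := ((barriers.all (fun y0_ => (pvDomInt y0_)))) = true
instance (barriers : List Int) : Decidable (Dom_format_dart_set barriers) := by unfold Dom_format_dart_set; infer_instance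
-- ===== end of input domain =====

-- B replaces A's sequential range-accumulator with set-membership boundary detection: run starts (x-1 not in the set) zipped with run ends (x+1 not in the set); objective: alternative algorithm, same cost. Pre_ states the set[int] parameter's invariant (distinct elements).


-- ===== PORT A =====
def COLUMNS : Int := 16

-- loop of find_contiguous_ranges over indices[1:], state (ranges, start, end)
def fcrLoop (ranges : List (Int × Int)) (start fin : Int) : List Int → List (Int × Int)
  | [] => ranges ++ [(start, fin)]
  | i :: t =>
      if i = fin + 1 then fcrLoop ranges start i t
      else fcrLoop (ranges ++ [(start, fin)]) i i t

def find_contiguous_ranges (indices : List Int) : List (Int × Int) :=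
  match indices with
  | [] => []
  | x :: rest => fcrLoop [] x x rest

-- body of A's for-loop over ranges: the line appended for one (start, end) range
def fmtLineA (start fin : Int) : String :=
  let count := fin - start + 1
  let start_row := PySem.Int.floordiv start COLUMNS
  let end_row := PySem.Int.floordiv fin COLUMNS
  if 8 ≤ count then
    "  for (int i = " ++ PySem.Int.toStr start ++ "; i <= " ++ PySem.Int.toStr fin ++
      "; i++) i, // rows " ++ PySem.Int.toStr start_row ++ "–" ++ PySem.Int.toStr end_row ++
      " (" ++ PySem.Int.toStr count ++ " tiles)"
  else
    let vals := PySem.Str.join ", " ((PySem.List.pyRange start (fin + 1) 1).map PySem.Int.toStr)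
    "  " ++ vals ++ ", // row " ++ PySem.Int.toStr start_row

def format_dart_set (barriers : List Int) : String :=
  let sorted_indices := PySem.List.sorted barriers (fun x => x) false
  let lines : List String := ["final Set<int> _modernOfficeBarriers = {"]
  let ranges := find_contiguous_ranges sorted_indices
  let lines := ranges.foldl (fun ls r => ls ++ [fmtLineA r.1 r.2]) lines
  let lines := lines ++ ["};"]
  PySem.Str.join "\n" lines

-- ===== PORT B =====
-- the line B's loop body appends for one zipped (start, end) pair (same text as Source B's f-strings)
def fmtLineB (start fin : Int) : String :=
  let count := fin - start + 1
  let start_row := PySem.Int.floordiv start COLUMNS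
  if 8 ≤ count then
    let end_row := PySem.Int.floordiv fin COLUMNS
    "  for (int i = " ++ PySem.Int.toStr start ++ "; i <= " ++ PySem.Int.toStr fin ++
      "; i++) i, // rows " ++ PySem.Int.toStr start_row ++ "–" ++ PySem.Int.toStr end_row ++
      " (" ++ PySem.Int.toStr count ++ " tiles)"
  else
    let vals := PySem.Str.join ", " ((PySem.List.pyRange start (fin + 1) 1).map PySem.Int.toStr)
    "  " ++ vals ++ ", // row " ++ PySem.Int.toStr start_row

def format_dart_set_alt (barriers : List Int) : String :=
  let s : PySem.Set Int := PySem.Set.ofList barriers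
  let xs := PySem.List.sorted s (fun x => x) false
  let starts := xs.filter (fun x => !(PySem.Set.contains s (x - 1)))
  let ends := xs.filter (fun x => !(PySem.Set.contains s (x + 1)))
  let lines := (starts.zip ends).foldl (fun ls r => ls ++ [fmtLineB r.1 r.2])
      ["final Set<int> _modernOfficeBarriers = {"]
  PySem.Str.join "\n" (lines ++ ["};"])

-- ===== PRECONDITION & SPEC =====
-- Pre_ excludes lists with duplicate elements: the Python parameter is a set[int] (which cannot
-- hold duplicates), and on such non-set lists A's duplicated range output is accidental.
def Pre_format_dart_set (barriers : List Int) : Prop := barriers.Nodup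
instance (barriers : List Int) : Decidable (Pre_format_dart_set barriers) := by unfold Pre_format_dart_set; infer_instance

def pvWitness_format_dart_set : List Int := [1, 2, 3, 10]

def Spec_format_dart_set (barriers : List Int) (out : String) : Prop := out = format_dart_set_alt barriers
instance (barriers : List Int) (out : String) : Decidable (Spec_format_dart_set barriers out) := by unfold Spec_format_dart_set; infer_instance

-- ===== CLAIM (what is proved, stated in full; the proofs are below) =====
def Claim_equal_format_dart_set : Prop := ∀ (barriers : List Int), Dom_format_dart_set barriers → Pre_format_dart_set barriers → Spec_format_dart_set barriers (format_dart_set barriers)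

-- ===== LEMMAS AND PROOFS =====

theorem fmt_eq (s e : Int) : fmtLineA s e = fmtLineB s e := by
  simp [fmtLineA, fmtLineB]

-- the contiguous run starting after value `fin`: (run end, remaining suffix)
def takeRun (fin : Int) : List Int → Int × List Int
  | [] => (fin, [])
  | i :: t => if i = fin + 1 then takeRun i t else (fin, i :: t)

theorem takeRun_len (t : List Int) : ∀ fin, (takeRun fin t).2.length ≤ t.length := by
  induction t with
  | nil => intro fin; simp [takeRun]
  | cons i t ih =>
      intro fin
      simp only [takeRun]
      split
      · exact Nat.le_trans (ih i) (Nat.le_succ _)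
      · simp

-- structural form of find_contiguous_ranges: one (start, end) pair per contiguous run
def runsOf : List Int → List (Int × Int)
  | [] => []
  | x :: t =>
      let p := takeRun x t
      (x, p.1) :: runsOf p.2
termination_by xs => xs.length
decreasing_by
  simpa using Nat.lt_succ_of_le (takeRun_len t x)

theorem fcrLoop_eq (t : List Int) :
    ∀ (ranges : List (Int × Int)) (s fin : Int),
      fcrLoop ranges s fin t =
        ranges ++ ((s, (takeRun fin t).1) :: runsOf (takeRun fin t).2) := by
  induction t with
  | nil => intro ranges s fin; simp [fcrLoop, takeRun, runsOf]
  | cons i t ih =>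
      intro ranges s fin
      simp only [fcrLoop, takeRun]
      split
      · rw [ih]
      · rw [ih]
        simp [runsOf]

theorem fcr_eq_runsOf (xs : List Int) : find_contiguous_ranges xs = runsOf xs := by
  cases xs with
  | nil => simp [find_contiguous_ranges, runsOf]
  | cons x t => simp [find_contiguous_ranges, fcrLoop_eq, runsOf]

-- the consecutive integers s, s+1, …, s+n-1
def consec (s : Int) : Nat → List Int
  | 0 => []
  | n + 1 => s :: consec (s + 1) n

theorem mem_consec (n : Nat) : ∀ (s y : Int), y ∈ consec s n ↔ s ≤ y ∧ y < s + n := by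
  induction n with
  | zero => intro s y; simp only [consec, List.not_mem_nil, Nat.cast_zero, add_zero, false_iff, not_and, not_lt]; omega
  | succ n ih =>
      intro s y
      simp only [consec, List.mem_cons, ih]
      push_cast
      omega

theorem filter_consec_last (q : Int → Bool) (n : Nat) :
    ∀ s : Int, (∀ y ∈ consec s n, q y = decide (y = s + n - 1)) →
      (consec s n).filter q = if n = 0 then [] else [s + n - 1] := by
  induction n with
  | zero => intro s _; simp [consec]
  | succ n ih =>
      intro s h
      have hs : q s = decide (s = s + (n + 1 : Nat) - 1) := h s (by simp [consec])
      simp only [consec, List.filter_cons]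
      rcases Nat.eq_zero_or_pos n with hn | hn
      · subst hn
        have hqs : q s = true := by rw [hs]; simp
        rw [if_pos hqs]
        simp [consec]
      · have hqs : q s = false := by
          rw [hs]
          simp only [decide_eq_false_iff_not]
          push_cast
          omega
        have hrec := ih (s + 1) (by
          intro y hy
          rw [h y (by simp [consec, hy])]
          simp only [decide_eq_decide]
          push_cast
          omega)
        rw [hqs]
        simp only [Bool.false_eq_true, if_neg (by omega : ¬ n = 0)] at hrec ⊢
        rw [if_neg (by simp)]
        rw [hrec]
        rw [if_neg (by omega : ¬ (n + 1 : Nat) = 0)]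
        congr 1
        push_cast
        omega

-- takeRun on a strictly increasing tail: the consumed prefix is consecutive
theorem takeRun_spec (t : List Int) :
    ∀ x : Int, (x :: t).Pairwise (· < ·) →
      ∃ (n : Nat) (rest : List Int),
        takeRun x t = (x + n, rest) ∧ t = consec (x + 1) n ++ rest ∧
        (∀ y ∈ rest, x + n + 1 < y) ∧ rest.Pairwise (· < ·) := by
  induction t with
  | nil =>
      intro x _
      exact ⟨0, [], by simp [takeRun], by simp [consec], by simp, by simp⟩
  | cons i t ih =>
      intro x hp
      have hp' : (i :: t).Pairwise (· < ·) := hp.tail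
      have hxi : x < i := (List.pairwise_cons.mp hp).1 i (by simp)
      by_cases hcase : i = x + 1
      · subst hcase
        obtain ⟨n, rest, h1, h2, h3, h4⟩ := ih (x + 1) hp'
        refine ⟨n + 1, rest, ?_, ?_, ?_, h4⟩
        · simp [takeRun, h1, Prod.ext_iff]
          omega
        · simp only [consec, List.cons_append]
          rw [h2]
        · intro y hy
          have := h3 y hy
          omega
      · refine ⟨0, i :: t, ?_, by simp [consec], ?_, hp'⟩
        · simp [takeRun, hcase]
        · intro y hy
          rw [List.mem_cons] at hy
          rcases hy with h | h
          · subst h; omega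
          · have hiy : i < y := (List.pairwise_cons.mp hp').1 y h
            omega

-- main lemma: membership-boundary filters zipped = the sequential grouping
theorem zip_filter_eq_runsOf (N : Nat) :
    ∀ (xs : List Int), xs.length ≤ N → xs.Pairwise (· < ·) →
      (xs.filter (fun y => !(xs.contains (y - 1)))).zip
        (xs.filter (fun y => !(xs.contains (y + 1)))) = runsOf xs := by
  induction N with
  | zero =>
      intro xs hlen _
      have : xs = [] := List.eq_nil_of_length_eq_zero (Nat.le_zero.mp hlen)
      subst this
      simp [runsOf]
  | succ N ih =>
      intro xs hlen hp
      cases xs with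
      | nil => simp [runsOf]
      | cons x t =>
          obtain ⟨n, rest, hTR, hseq, hbig, hrestp⟩ := takeRun_spec t x hp
          -- membership characterisation of xs = x :: consec (x+1) n ++ rest
          have hconP : ∀ z : Int, ((x :: t).contains z) =
              decide (z = x ∨ (x + 1 ≤ z ∧ z < x + 1 + n) ∨ z ∈ rest) := by
            intro z
            rw [Bool.eq_iff_iff, List.contains_iff_mem, decide_eq_true_iff]
            subst hseq
            simp [mem_consec]
          -- t-free forms of the two filter predicates
          have hPD : ∀ l : List Int,
              l.filter (fun y => !((x :: t).contains (y - 1))) =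
              l.filter (fun y => !(decide (y - 1 = x ∨ (x + 1 ≤ y - 1 ∧ y - 1 < x + 1 + (n : Int)) ∨ y - 1 ∈ rest))) := by
            intro l
            apply List.filter_congr
            intro y _
            rw [hconP]
          have hQD : ∀ l : List Int,
              l.filter (fun y => !((x :: t).contains (y + 1))) =
              l.filter (fun y => !(decide (y + 1 = x ∨ (x + 1 ≤ y + 1 ∧ y + 1 < x + 1 + (n : Int)) ∨ y + 1 ∈ rest))) := by
            intro l
            apply List.filter_congr
            intro y _
            rw [hconP]
          -- the start filter
          have hPx : (!((x :: t).contains (x - 1))) = true := by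
            rw [hconP]
            simp only [Bool.not_eq_true', decide_eq_false_iff_not]
            rintro (h | h | h)
            · omega
            · omega
            · have := hbig _ h; omega
          have hPseg : (consec (x + 1) n).filter
              (fun y => !(decide (y - 1 = x ∨ (x + 1 ≤ y - 1 ∧ y - 1 < x + 1 + (n : Int)) ∨ y - 1 ∈ rest))) = [] := by
            rw [List.filter_eq_nil_iff]
            intro y hy
            rw [mem_consec] at hy
            simp only [Bool.not_eq_true', Bool.not_eq_false, decide_eq_true_iff]
            have : y - 1 = x ∨ (x + 1 ≤ y - 1 ∧ y - 1 < x + 1 + (n : Int)) := by omega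
            tauto
          have hPrest : rest.filter
              (fun y => !(decide (y - 1 = x ∨ (x + 1 ≤ y - 1 ∧ y - 1 < x + 1 + (n : Int)) ∨ y - 1 ∈ rest))) =
              rest.filter (fun y => !(rest.contains (y - 1))) := by
            apply List.filter_congr
            intro y hy
            have hyb := hbig y hy
            have heq : (decide (y - 1 = x ∨ (x + 1 ≤ y - 1 ∧ y - 1 < x + 1 + (n : Int)) ∨ y - 1 ∈ rest) : Bool)
                = (rest.contains (y - 1)) := by
              rw [Bool.eq_iff_iff, List.contains_iff_mem, decide_eq_true_iff]
              constructor
              · rintro (h | h | h)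
                · omega
                · omega
                · exact h
              · intro h; exact Or.inr (Or.inr h)
            rw [heq]
          -- the end filter
          have hQx : (!((x :: t).contains (x + 1))) = decide (n = 0) := by
            rw [hconP, Bool.eq_iff_iff]
            simp only [Bool.not_eq_true', decide_eq_false_iff_not, decide_eq_true_iff]
            constructor
            · intro hnc
              by_contra hne
              exact hnc (Or.inr (Or.inl (by omega)))
            · rintro hn0 (h | h | h)
              · omega
              · omega
              · have := hbig _ h; omega
          have hQseg : (consec (x + 1) n).filter
              (fun y => !(decide (y + 1 = x ∨ (x + 1 ≤ y + 1 ∧ y + 1 < x + 1 + (n : Int)) ∨ y + 1 ∈ rest))) =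
              if n = 0 then [] else [x + 1 + (n : Int) - 1] := by
            apply filter_consec_last
            intro y hy
            rw [mem_consec] at hy
            rw [Bool.eq_iff_iff]
            simp only [Bool.not_eq_true', decide_eq_false_iff_not, decide_eq_true_iff]
            constructor
            · intro hnc
              by_contra hne
              exact hnc (Or.inr (Or.inl (by omega)))
            · rintro hye (h | h | h)
              · omega
              · omega
              · have := hbig _ h; omega
          have hQrest : rest.filter
              (fun y => !(decide (y + 1 = x ∨ (x + 1 ≤ y + 1 ∧ y + 1 < x + 1 + (n : Int)) ∨ y + 1 ∈ rest))) =
              rest.filter (fun y => !(rest.contains (y + 1))) := by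
            apply List.filter_congr
            intro y hy
            have hyb := hbig y hy
            have heq : (decide (y + 1 = x ∨ (x + 1 ≤ y + 1 ∧ y + 1 < x + 1 + (n : Int)) ∨ y + 1 ∈ rest) : Bool)
                = (rest.contains (y + 1)) := by
              rw [Bool.eq_iff_iff, List.contains_iff_mem, decide_eq_true_iff]
              constructor
              · rintro (h | h | h)
                · omega
                · omega
                · exact h
              · intro h; exact Or.inr (Or.inr h)
            rw [heq]
          have hrest_len : rest.length ≤ N := by
            have ht : t.length ≤ N := by simpa using hlen
            have h2 : rest.length ≤ t.length := by
              subst hseq; simp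
            omega
          have hih := ih rest hrest_len hrestp
          have hstarts : (x :: t).filter (fun y => !((x :: t).contains (y - 1))) =
              x :: rest.filter (fun y => !(rest.contains (y - 1))) := by
            rw [List.filter_cons, if_pos hPx]
            congr 1
            rw [hPD t]
            conv_lhs => rw [hseq]
            rw [List.filter_append, hPseg, hPrest]
            simp
          have hends : (x :: t).filter (fun y => !((x :: t).contains (y + 1))) =
              (x + n) :: rest.filter (fun y => !(rest.contains (y + 1))) := by
            rw [List.filter_cons]
            rcases Nat.eq_zero_or_pos n with hn | hn
            · subst hn
              rw [if_pos (by rw [hQx]; simp)]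
              rw [hQD t]
              conv_lhs => rw [hseq]
              rw [List.filter_append, hQseg, hQrest]
              simp
            · rw [if_neg (by rw [hQx]; simp; omega)]
              rw [hQD t]
              conv_lhs => rw [hseq]
              rw [List.filter_append, hQseg, hQrest]
              rw [if_neg (by omega)]
              simp only [List.singleton_append]
              congr 1
              omega
          rw [hstarts, hends]
          simp only [List.zip_cons_cons]
          rw [hih]
          conv_rhs => rw [runsOf]
          rw [hTR]

-- ===== VERDICT (by name: the statement is the Claim_ definition above) =====
theorem format_dart_set_spec : Claim_equal_format_dart_set := by
  intro barriers _ hnodup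
  unfold Spec_format_dart_set format_dart_set format_dart_set_alt
  -- the two sorted lists coincide: barriers has no duplicates, so set(barriers) ~ barriers
  have hperm : barriers.Perm (PySem.Set.ofList barriers) :=
    (List.perm_ext_iff_of_nodup hnodup (PySem.Set.nodup_ofList barriers)).mpr
      (fun a => (PySem.Set.mem_ofList barriers a).symm)
  have hsorted : PySem.List.sorted barriers (fun x => x) false =
      PySem.List.sorted (PySem.Set.ofList barriers) (fun x => x) false :=
    PySem.List.sorted_eq_sorted_of_perm _ _ _ (fun a b h => h) hperm
  rw [hsorted]
  set xs := PySem.List.sorted (PySem.Set.ofList barriers) (fun x => x) false with hxs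
  have hpw : xs.Pairwise (· < ·) := PySem.List.sorted_ofList_pairwise_lt barriers
  -- membership in the set equals membership in xs
  have hcontains : ∀ z : Int, PySem.Set.contains (PySem.Set.ofList barriers) z = xs.contains z := by
    intro z
    rw [Bool.eq_iff_iff]
    simp only [PySem.Set.contains]
    rw [List.elem_iff, List.contains_iff_mem, hxs, PySem.List.mem_sorted, PySem.Set.mem_ofList]
  simp only [PySem.List.foldl_append_singleton_eq_map]
  simp only [hcontains]
  rw [zip_filter_eq_runsOf xs.length xs (le_refl _) hpw, ← fcr_eq_runsOf]
  simp [fmt_eq]
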